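-- pv_equiv track=rewrite | github.com/iZelikov/beegeek-algo | task_6_3.py | min_even_digit
-- ===== SOURCE A (Python) =====
-- def min_even_digit(num):
--     m = 9
--     while num > 0:
--         d = num % 10
--         num = num // 10
--         if d <= m and d % 2 == 0:
--             m = d
--     return (-1, m)[m < 9]
-- ===== SOURCE B (Python) =====
-- def min_even_digit(num):
--     digits = set()
--     while num > 0:
--         digits.add(num % 10)
--         num //= 10
--     for c in (0, 2, 4, 6, 8):
--         if c in digits:
--             return c
--     return -1
-- ===== Notes on version B (the rewrite author's own statement) =====
-- stated objective: idiomatic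
-- what changed: Replaces A's online minimum-tracking over every digit (sentinel 9) with collecting the digits into a set and probing the even candidate digits in ascending order, returning the first one present.
import Mathlib
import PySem

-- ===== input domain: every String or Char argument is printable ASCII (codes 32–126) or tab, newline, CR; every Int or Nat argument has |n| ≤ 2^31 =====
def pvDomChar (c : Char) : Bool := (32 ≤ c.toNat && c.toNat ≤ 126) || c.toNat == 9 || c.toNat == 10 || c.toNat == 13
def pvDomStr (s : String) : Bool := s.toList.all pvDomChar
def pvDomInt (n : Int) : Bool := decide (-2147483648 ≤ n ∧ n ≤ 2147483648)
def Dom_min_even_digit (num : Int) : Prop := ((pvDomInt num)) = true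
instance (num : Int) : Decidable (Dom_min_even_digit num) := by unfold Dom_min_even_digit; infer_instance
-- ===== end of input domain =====

-- B collects the digits into a set and probes the even candidate digits in ascending
-- order, instead of A's online minimum-tracking with sentinel 9 (alternative, same cost).


-- termination helper for both loops (num // 10 shrinks while num > 0)
theorem pvFloordiv10_lt (num : Int) (h : num > 0) :
    (PySem.Int.floordiv num 10).toNat < num.toNat := by
  rw [PySem.Int.floordiv_eq_ediv_of_pos (by omega)]
  omega

-- ===== PORT A =====
-- while num > 0: d = num % 10; num = num // 10; if d <= m and d % 2 == 0: m = d
def minEvenLoop (num m : Int) : Int :=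
  if h : num > 0 then
    minEvenLoop (PySem.Int.floordiv num 10)
      (if PySem.Int.mod num 10 ≤ m ∧ PySem.Int.mod (PySem.Int.mod num 10) 2 = 0
       then PySem.Int.mod num 10 else m)
  else m
termination_by num.toNat
decreasing_by exact pvFloordiv10_lt num h

def min_even_digit (num : Int) : Int :=
  -- return (-1, m)[m < 9]
  if minEvenLoop num 9 < 9 then minEvenLoop num 9 else -1

-- ===== PORT B =====
-- while num > 0: digits.add(num % 10); num //= 10
def collectDigits (num : Int) (s : PySem.Set Int) : PySem.Set Int :=
  if h : num > 0 then
    collectDigits (PySem.Int.floordiv num 10) (PySem.Set.add s (PySem.Int.mod num 10))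
  else s
termination_by num.toNat
decreasing_by exact pvFloordiv10_lt num h

-- for c in (0, 2, 4, 6, 8): if c in digits: return c;  return -1
def probeEven : List Int → PySem.Set Int → Int
  | [], _ => -1
  | c :: cs, s => if PySem.Set.contains s c then c else probeEven cs s

def min_even_digit_alt (num : Int) : Int :=
  probeEven [0, 2, 4, 6, 8] (collectDigits num PySem.Set.empty)

-- ===== PRECONDITION & SPEC =====
def Spec_min_even_digit (num : Int) (out : Int) : Prop := out = min_even_digit_alt num
instance (num : Int) (out : Int) : Decidable (Spec_min_even_digit num out) := by unfold Spec_min_even_digit; infer_instance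

-- ===== CLAIM (what is proved, stated in full; the proofs are below) =====
def Claim_equal_min_even_digit : Prop := ∀ (num : Int), Dom_min_even_digit num → Spec_min_even_digit num (min_even_digit num)

-- ===== LEMMAS AND PROOFS =====

-- the digits of num (least-significant first), as A's loop and B's collector visit them
def digitsOf (num : Int) : List Int :=
  if h : num > 0 then PySem.Int.mod num 10 :: digitsOf (PySem.Int.floordiv num 10) else []
termination_by num.toNat
decreasing_by exact pvFloordiv10_lt num h

theorem mem_collectDigits (num : Int) (s : PySem.Set Int) (x : Int) :
    x ∈ collectDigits num s ↔ x ∈ s ∨ x ∈ digitsOf num := by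
  induction num, s using collectDigits.induct with
  | case1 num s h ih =>
      rw [collectDigits, digitsOf]
      simp only [h, dif_pos, ih, PySem.Set.mem_add, List.mem_cons]
      tauto
  | case2 num s h =>
      rw [collectDigits, digitsOf]
      simp [h]

theorem digitsOf_bounds (num : Int) (x : Int) : x ∈ digitsOf num → 0 ≤ x ∧ x < 10 := by
  induction num using digitsOf.induct with
  | case1 num h ih =>
      intro hx
      rw [digitsOf] at hx
      simp only [h, dif_pos, List.mem_cons] at hx
      rcases hx with rfl | hx
      · exact ⟨PySem.Int.mod_nonneg _ (by omega), PySem.Int.mod_lt _ (by omega)⟩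
      · exact ih hx
  | case2 num h =>
      intro hx
      rw [digitsOf] at hx
      simp [h] at hx

-- A's loop returns the minimum of m and the even digits of num
theorem minEvenLoop_spec (num m : Int) :
    minEvenLoop num m ≤ m ∧
    (minEvenLoop num m = m ∨
      (minEvenLoop num m ∈ digitsOf num ∧ PySem.Int.mod (minEvenLoop num m) 2 = 0)) ∧
    (∀ d ∈ digitsOf num, PySem.Int.mod d 2 = 0 → minEvenLoop num m ≤ d) := by
  induction num, m using minEvenLoop.induct with
  | case1 num m h ih =>
      rw [minEvenLoop, digitsOf]
      simp only [h, dif_pos]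
      by_cases hc : PySem.Int.mod num 10 ≤ m ∧ PySem.Int.mod (PySem.Int.mod num 10) 2 = 0
      · rw [dif_pos hc] at ih; rw [if_pos hc]
        obtain ⟨ih1, ih2, ih3⟩ := ih
        refine ⟨le_trans ih1 hc.1, ?_, ?_⟩
        · rcases ih2 with he | ⟨hm, hev⟩
          · exact Or.inr ⟨List.mem_cons.mpr (Or.inl he), by rw [he]; exact hc.2⟩
          · exact Or.inr ⟨List.mem_cons_of_mem _ hm, hev⟩
        · intro d hd hev
          rcases List.mem_cons.mp hd with rfl | hd'
          · exact ih1
          · exact ih3 d hd' hev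
      · rw [dif_neg hc] at ih; rw [if_neg hc]
        obtain ⟨ih1, ih2, ih3⟩ := ih
        refine ⟨ih1, ?_, ?_⟩
        · rcases ih2 with he | ⟨hm, hev⟩
          · exact Or.inl he
          · exact Or.inr ⟨List.mem_cons_of_mem _ hm, hev⟩
        · intro d hd hev
          rcases List.mem_cons.mp hd with rfl | hd'
          · have hnle : ¬ (PySem.Int.mod num 10 ≤ m) := fun hle => hc ⟨hle, hev⟩
            omega
          · exact ih3 d hd' hev
  | case2 num m h =>
      rw [minEvenLoop, digitsOf]
      simp [h]

theorem probeEven_none (cs : List Int) (s : PySem.Set Int) :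
    (∀ c ∈ cs, c ∉ s) → probeEven cs s = -1 := by
  induction cs with
  | nil => intro _; rfl
  | cons c cs ih =>
      intro h
      rw [probeEven]
      have hc : ¬ PySem.Set.contains s c = true := by
        rw [PySem.Set.contains_iff]; exact h c List.mem_cons_self
      simp only [hc]
      exact ih fun c' hc' => h c' (List.mem_cons_of_mem _ hc')

theorem probeEven_first (cs : List Int) : ∀ (s : PySem.Set Int) (r : Int),
    r ∈ s → r ∈ cs → (∀ c ∈ cs, c ∈ s → r ≤ c) → cs.Pairwise (· < ·) →
    probeEven cs s = r := by
  induction cs with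
  | nil => intro s r _ hmem _ _; cases hmem
  | cons c cs ih =>
      intro s r hr hmem hmin hsort
      rw [probeEven]
      by_cases hc : PySem.Set.contains s c = true
      · simp only [hc, if_pos]
        have hcs : c ∈ s := (PySem.Set.contains_iff s c).mp hc
        have hrc : r ≤ c := hmin c List.mem_cons_self hcs
        rcases List.mem_cons.mp hmem with rfl | hr'
        · rfl
        · have := (List.pairwise_cons.mp hsort).1 r hr'
          omega
      · simp only [hc]
        have hne : r ≠ c := fun he => hc (by rw [PySem.Set.contains_iff]; exact he ▸ hr)
        exact ih s r hr ((List.mem_cons.mp hmem).resolve_left hne)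
          (fun c' hc' hcs' => hmin c' (List.mem_cons_of_mem _ hc') hcs')
          (List.pairwise_cons.mp hsort).2

-- ===== VERDICT (by name: the statement is the Claim_ definition above) =====
theorem min_even_digit_spec : Claim_equal_min_even_digit := by
  intro num _
  show min_even_digit num = min_even_digit_alt num
  unfold min_even_digit min_even_digit_alt
  obtain ⟨h1, h2, h3⟩ := minEvenLoop_spec num 9
  set r := minEvenLoop num 9 with hr
  have hS : ∀ x : Int, x ∈ collectDigits num PySem.Set.empty ↔ x ∈ digitsOf num := by
    intro x
    rw [mem_collectDigits]
    simp [PySem.Set.empty]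
  have hmin : ∀ c ∈ ([0, 2, 4, 6, 8] : List Int),
      c ∈ collectDigits num PySem.Set.empty → r ≤ c := by
    intro c hc hcm
    have hd : c ∈ digitsOf num := (hS c).mp hcm
    fin_cases hc <;> exact h3 _ hd (by decide)
  by_cases hlt : r < 9
  · simp only [hlt, if_pos]
    have hrd : r ∈ digitsOf num ∧ PySem.Int.mod r 2 = 0 := by
      rcases h2 with he | h2
      · omega
      · exact h2
    have hb := digitsOf_bounds num r hrd.1
    have hev : r % 2 = 0 := by
      rw [← PySem.Int.mod_eq_emod_of_pos (by omega : (0:Int) < 2)]; exact hrd.2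
    have hmem : r ∈ ([0, 2, 4, 6, 8] : List Int) := by
      simp only [List.mem_cons, List.not_mem_nil, or_false]
      omega
    exact (probeEven_first _ _ r ((hS r).mpr hrd.1) hmem hmin (by decide)).symm
  · simp only [hlt]
    refine (probeEven_none _ _ ?_).symm
    intro c hc hcm
    have := hmin c hc hcm
    have hd : c ∈ digitsOf num := (hS c).mp hcm
    have := digitsOf_bounds num c hd
    fin_cases hc <;> omega
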